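-- pv_equiv track=rewrite | github.com/tan32217/ChatDB | backend/src/queryMapper.py | find_matching_column
-- ===== SOURCE A (Python) =====
-- def find_matching_column(search_term, schema_map):
--     search_term = search_term.lower()
--     for column_key, synonyms in schema_map.items():
--         if search_term == column_key.lower() or search_term in [syn.lower() for syn in synonyms]:
--             return column_key
--     # Singularize if necessary
--     if search_term.endswith('es'):
--         singular_term = search_term[:-2]
--     elif search_term.endswith('s'):
--         singular_term = search_term[:-1]
--     else:
--         singular_term = search_term
--     if singular_term != search_term:
--         for column_key, synonyms in schema_map.items():
--             if singular_term == column_key.lower() or singular_term in [syn.lower() for syn in synonyms]: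
--                 return column_key
--     return None
-- ===== SOURCE B (Python) =====
-- def find_matching_column(search_term, schema_map):
--     index = {}
--     for column_key, synonyms in schema_map.items():
--         for term in [column_key, *synonyms]:
--             t = term.lower()
--             if t not in index:
--                 index[t] = column_key
--     st = search_term.lower()
--     if st.endswith('es'):
--         singular = st[:-2]
--     elif st.endswith('s'):
--         singular = st[:-1]
--     else:
--         singular = st
--     if st in index:
--         return index[st]
--     if singular in index:
--         return index[singular]
--     return None
-- ===== Notes on version B (the rewrite author's own statement) =====
-- stated objective: idiomatic
-- what changed: Replaces the two repeated scans over schema_map by a single pass building a lowercased term->column index (insert-if-absent so the earliest column wins) followed by two constant-time lookups.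
import Mathlib
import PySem

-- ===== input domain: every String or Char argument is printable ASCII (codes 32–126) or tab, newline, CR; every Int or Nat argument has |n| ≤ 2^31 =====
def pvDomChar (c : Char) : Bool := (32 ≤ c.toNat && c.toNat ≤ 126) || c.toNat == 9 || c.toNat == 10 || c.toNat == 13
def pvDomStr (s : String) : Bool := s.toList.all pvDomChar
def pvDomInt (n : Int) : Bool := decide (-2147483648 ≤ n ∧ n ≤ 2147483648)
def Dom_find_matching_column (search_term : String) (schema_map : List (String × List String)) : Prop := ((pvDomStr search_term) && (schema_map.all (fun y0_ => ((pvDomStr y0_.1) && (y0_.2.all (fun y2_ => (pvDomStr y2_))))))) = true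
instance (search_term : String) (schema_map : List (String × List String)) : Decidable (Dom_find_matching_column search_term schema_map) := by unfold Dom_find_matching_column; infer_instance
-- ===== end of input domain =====

-- B builds one lowercased term->column index (insert-if-absent, earliest column wins) and does
-- two lookups instead of A's two repeated scans over schema_map; same result, more idiomatic.

-- ===== PORT A =====
-- one scanning loop of A (early return on match)
def pvA_scan (t : String) : List (String × List String) → Option String
  | [] => none
  | (ck, syns) :: rest =>
    if t == PySem.Str.lower ck || (syns.map PySem.Str.lower).contains t then some ck
    else pvA_scan t rest

def find_matching_column (search_term : String) (schema_map : List (String × List String)) : Option String :=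
  let s := PySem.Str.lower search_term
  match pvA_scan s schema_map with
  | some ck => some ck
  | none =>
    let singular :=
      if PySem.Str.endswith s "es" then PySem.Str.slice s none (some (-2))
      else if PySem.Str.endswith s "s" then PySem.Str.slice s none (some (-1))
      else s
    if singular ≠ s then pvA_scan singular schema_map else none

-- ===== PORT B =====
-- the index build of Source B: for each column, insert each lowercased term if absent
def pvB_index (schema_map : List (String × List String)) : PySem.Dict String String :=
  schema_map.foldl (fun d p =>
    (p.1 :: p.2).foldl (fun d term =>
      let t := PySem.Str.lower term
      if d.contains t then d else d.insert t p.1) d) PySem.Dict.empty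

def find_matching_column_alt (search_term : String) (schema_map : List (String × List String)) : Option String :=
  let index := pvB_index schema_map
  let st := PySem.Str.lower search_term
  let singular :=
    if PySem.Str.endswith st "es" then PySem.Str.slice st none (some (-2))
    else if PySem.Str.endswith st "s" then PySem.Str.slice st none (some (-1))
    else st
  match index.get? st with
  | some v => some v
  | none =>
    match index.get? singular with
    | some v => some v
    | none => none

-- ===== PRECONDITION & SPEC =====
def Spec_find_matching_column (search_term : String) (schema_map : List (String × List String)) (out : Option String) : Prop := out = find_matching_column_alt search_term schema_map
instance (search_term : String) (schema_map : List (String × List String)) (out : Option String) : Decidable (Spec_find_matching_column search_term schema_map out) := by unfold Spec_find_matching_column; infer_instance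

-- ===== CLAIM (what is proved, stated in full; the proofs are below) =====
def Claim_equal_find_matching_column : Prop := ∀ (search_term : String) (schema_map : List (String × List String)), Dom_find_matching_column search_term schema_map → Spec_find_matching_column search_term schema_map (find_matching_column search_term schema_map)

-- ===== LEMMAS AND PROOFS =====

-- inner loop of the index build: lookup after inserting one column's terms
theorem pvB_inner_get? (ts : List String) (ck : String) (d : PySem.Dict String String) (x : String) :
    ((ts.foldl (fun d term =>
        let t := PySem.Str.lower term
        if d.contains t then d else d.insert t ck) d).get? x)
    = (d.get? x).or (if (ts.map PySem.Str.lower).contains x then some ck else none) := by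
  induction ts generalizing d with
  | nil => simp
  | cons term rest ih =>
    rw [List.foldl_cons, List.map_cons, List.contains_cons]
    show ((rest.foldl _ (if d.contains (PySem.Str.lower term) then d
        else d.insert (PySem.Str.lower term) ck)).get? x) = _
    by_cases hc : d.contains (PySem.Str.lower term) = true
    · rw [if_pos hc, ih]
      by_cases hx : x = PySem.Str.lower term
      · have hs : (d.get? x).isSome := by
          rw [hx, ← PySem.Dict.contains_eq_isSome_get?]; exact hc
        rcases Option.isSome_iff_exists.mp hs with ⟨v, hv⟩
        rw [hv, Option.some_or, Option.some_or]
      · have hxf : (x == PySem.Str.lower term) = false := by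
          simp only [beq_eq_false_iff_ne, ne_eq]; exact hx
        rw [hxf, Bool.false_or]
    · rw [if_neg hc, ih, PySem.Dict.get?_insert]
      by_cases hx : x = PySem.Str.lower term
      · have hd : d.get? x = none := by
          rw [hx]
          cases h : d.get? (PySem.Str.lower term) with
          | none => rfl
          | some v =>
            exact absurd (by rw [PySem.Dict.contains_eq_isSome_get?, h]; rfl) hc
        have hxt : (x == PySem.Str.lower term) = true := by
          simp [hx]
        rw [if_pos hx, hd, hxt, Bool.true_or, if_pos rfl, Option.some_or, Option.none_or]
      · have hxf : (x == PySem.Str.lower term) = false := by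
          simp only [beq_eq_false_iff_ne, ne_eq]; exact hx
        rw [if_neg hx, hxf, Bool.false_or]

-- outer loop: a lookup in the index equals A's scan over the same schema_map
theorem pvB_index_get? (sm : List (String × List String)) (d : PySem.Dict String String) (x : String) :
    ((sm.foldl (fun d p =>
        (p.1 :: p.2).foldl (fun d term =>
          let t := PySem.Str.lower term
          if d.contains t then d else d.insert t p.1) d) d).get? x)
    = (d.get? x).or (pvA_scan x sm) := by
  induction sm generalizing d with
  | nil => simp [pvA_scan]
  | cons p rest ih =>
    rcases p with ⟨ck, syns⟩
    rw [List.foldl_cons, ih, pvB_inner_get?, Option.or_assoc]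
    congr 1
    simp only [List.map_cons, List.contains_cons, pvA_scan]
    split <;> simp

theorem pvB_lookup_eq_scan (sm : List (String × List String)) (x : String) :
    (pvB_index sm).get? x = pvA_scan x sm := by
  unfold pvB_index
  rw [pvB_index_get?]
  simp

-- ===== VERDICT (by name: the statement is the Claim_ definition above) =====
theorem find_matching_column_spec : Claim_equal_find_matching_column := by
  intro st sm _
  unfold Spec_find_matching_column
  simp only [find_matching_column, find_matching_column_alt, pvB_lookup_eq_scan]
  rcases h1 : pvA_scan (PySem.Str.lower st) sm with _ | v
  · by_cases he :
        (if PySem.Str.endswith (PySem.Str.lower st) "es" then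
            PySem.Str.slice (PySem.Str.lower st) none (some (-2))
          else if PySem.Str.endswith (PySem.Str.lower st) "s" then
            PySem.Str.slice (PySem.Str.lower st) none (some (-1))
          else PySem.Str.lower st) = PySem.Str.lower st
    · rw [he, h1, if_neg (fun h => h rfl)]
    · rw [if_pos he]
      rcases h2 : pvA_scan _ sm with _ | w <;> rfl
  · rfl
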